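-- pv_equiv track=rewrite | github.com/SohaibAamir28/M-IT-2-2025-Winter-Contest | begnieer/2.py | is_repetitive
-- ===== SOURCE A (Python) =====
-- def is_repetitive(s):
--     n = len(s)
--     i = 0
--     while i < n:
--         if s[i] != 'M':
--             return False
--         i += 1
--         if i >= n or s[i] != 'I':
--             return False
--         i += 1
--         if i >= n or s[i] != 'T':
--             return False
--         i += 1
--         while i < n - 1 and s[i] == 'I' and s[i + 1] == 'T':
--             i += 2
--     return i == n
-- ===== SOURCE B (Python) =====
-- def _step(q, c):
--     if q == 0:
--         return 1 if c == 'M' else 5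
--     if q == 1:
--         return 2 if c == 'I' else 5
--     if q == 2:
--         return 3 if c == 'T' else 5
--     if q == 3:
--         return 1 if c == 'M' else (4 if c == 'I' else 5)
--     if q == 4:
--         return 3 if c == 'T' else 5
--     return 5
--
-- def is_repetitive(s):
--     q = 0
--     for c in s:
--         q = _step(q, c)
--     return q == 0 or q == 3
-- ===== Notes on version B (the rewrite author's own statement) =====
-- stated objective: alternative
-- what changed: Replaced the nested index-walking while loops (outer MIT matcher plus inner IT-pair skipper with 2-3 char lookahead) by a single-pass table-driven 5-state DFA fold over the characters.
import Mathlib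
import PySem

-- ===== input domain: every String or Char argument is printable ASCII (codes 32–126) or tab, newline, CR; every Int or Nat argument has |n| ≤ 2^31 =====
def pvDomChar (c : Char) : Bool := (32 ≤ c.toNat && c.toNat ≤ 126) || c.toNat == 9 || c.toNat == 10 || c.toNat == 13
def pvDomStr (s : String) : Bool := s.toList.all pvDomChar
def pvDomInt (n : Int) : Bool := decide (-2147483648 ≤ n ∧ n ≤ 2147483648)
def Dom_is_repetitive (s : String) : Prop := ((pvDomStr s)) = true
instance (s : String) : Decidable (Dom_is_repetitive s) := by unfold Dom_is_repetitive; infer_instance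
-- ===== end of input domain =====

-- B replaces A's nested index-walking while loops with a single-pass 5-state DFA fold (alternative algorithm, same O(n) cost).


-- ===== PORT A =====
-- A's inner `while i < n - 1 and s[i] == 'I' and s[i+1] == 'T': i += 2`,
-- on the list of characters remaining from position i.
def pvSkipIT : List Char → List Char
  | 'I' :: 'T' :: r => pvSkipIT r
  | r => r

theorem pvSkipIT_len_le : ∀ (l : List Char), (pvSkipIT l).length ≤ l.length := by
  intro l
  induction l using pvSkipIT.induct with
  | case1 r ih => rw [pvSkipIT]; simp; omega
  | case2 r h => rw [pvSkipIT.eq_def]; split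
                 · exfalso; simp_all
                 · exact Nat.le_refl _

-- A's outer while loop; the index i is represented by the list of characters still
-- ahead of it (i < n ↔ that list is nonempty; the final `return i == n` is the [] case,
-- since the loop keeps i ≤ n).  Branches are in A's order: check 'M', then 'I', then 'T',
-- then skip the trailing (IT)* pairs and iterate.
def pvLoopA : List Char → Bool
  | [] => true
  | c :: r =>
    if c ≠ 'M' then false
    else match r with
      | 'I' :: r2 =>
        match r2 with
        | 'T' :: r3 => pvLoopA (pvSkipIT r3)
        | _ => false
      | _ => false
termination_by l => l.length
decreasing_by
  have := pvSkipIT_len_le r3; simp; omega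

def is_repetitive (s : String) : Bool := pvLoopA s.toList

-- ===== PORT B =====
-- transition function of Source B's `_step` (same states 0..5, 5 = dead)
def pvStep (q : Int) (c : Char) : Int :=
  if q == 0 then (if c == 'M' then 1 else 5)
  else if q == 1 then (if c == 'I' then 2 else 5)
  else if q == 2 then (if c == 'T' then 3 else 5)
  else if q == 3 then (if c == 'M' then 1 else if c == 'I' then 4 else 5)
  else if q == 4 then (if c == 'T' then 3 else 5)
  else 5

def is_repetitive_alt (s : String) : Bool :=
  let q := s.toList.foldl pvStep 0
  q == 0 || q == 3

-- ===== PRECONDITION & SPEC =====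
def Spec_is_repetitive (s : String) (out : Bool) : Prop := out = is_repetitive_alt s
instance (s : String) (out : Bool) : Decidable (Spec_is_repetitive s out) := by unfold Spec_is_repetitive; infer_instance

-- ===== CLAIM (what is proved, stated in full; the proofs are below) =====
def Claim_equal_is_repetitive : Prop := ∀ (s : String), Dom_is_repetitive s → Spec_is_repetitive s (is_repetitive s)

-- ===== LEMMAS AND PROOFS =====
-- acceptance of Source B's DFA started in state q
def pvRun (q : Int) (l : List Char) : Bool :=
  let q' := l.foldl pvStep q
  q' == 0 || q' == 3

theorem pvRun_dead : ∀ (l : List Char), pvRun 5 l = false := by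
  intro l; induction l with
  | nil => decide
  | cons c r ih => simpa [pvRun, pvStep] using ih

-- after a completed block (state 3), skipping leading "IT" pairs returns to the start state
theorem pvRun_three : ∀ (l : List Char), pvRun 3 l = pvRun 0 (pvSkipIT l) := by
  intro l
  induction l using pvSkipIT.induct with
  | case1 r ih =>
      simpa [pvSkipIT, pvRun, pvStep] using ih
  | case2 r h =>
      match r, h with
      | [], _ => decide
      | [c], _ =>
          rw [pvSkipIT.eq_def]
          by_cases hM : c = 'M' <;> by_cases hI : c = 'I' <;>
            simp_all [pvRun, pvStep, List.foldl]
      | c :: d :: r', h =>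
          rw [pvSkipIT.eq_def]
          by_cases hM : c = 'M'
          · subst hM; simp [pvRun, pvStep, List.foldl]
          · by_cases hI : c = 'I'
            · subst hI
              have hd : d ≠ 'T' := fun hdT => h r' (by rw [hdT])
              have hdb : (d == 'T') = false := by simpa using hd
              simp [pvRun, pvStep, List.foldl, hdb]
            · have hMb : (c == 'M') = false := by simpa using hM
              have hIb : (c == 'I') = false := by simpa using hI
              simp [pvRun, pvStep, List.foldl, hMb, hIb]

theorem pvLoopA_eq_run : ∀ (l : List Char), pvLoopA l = pvRun 0 l := by
  intro l
  induction l using pvLoopA.induct with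
  | case1 => rw [pvLoopA.eq_def]; decide
  | case2 c r h =>
      rw [pvLoopA.eq_def]
      have hc : (c == 'M') = false := by simpa using h
      simp [h, pvRun, List.foldl, pvStep, hc]
      simpa [pvRun] using pvRun_dead r
  | case3 c hM r3 ih =>
      have hc : c = 'M' := by simpa using hM
      subst hc
      rw [pvLoopA.eq_def]
      simp only [ne_eq, not_true_eq_false, if_false]
      rw [ih]
      have : pvRun 0 ('M' :: 'I' :: 'T' :: r3) = pvRun 3 r3 := by
        simp [pvRun, pvStep, List.foldl]
      rw [this, pvRun_three]
  | case4 c hM r2 h =>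
      have hc : c = 'M' := by simpa using hM
      subst hc
      rw [pvLoopA.eq_def]
      match r2, h with
      | [], _ => decide
      | d :: r', h =>
          have hd : d ≠ 'T' := fun hdT => h r' (by rw [hdT])
          have hdb : (d == 'T') = false := by simpa using hd
          simp [pvRun, pvStep, List.foldl, hdb]
          simpa [pvRun] using pvRun_dead r'
  | case5 c r hM h =>
      have hc : c = 'M' := by simpa using hM
      subst hc
      rw [pvLoopA.eq_def]
      match r, h with
      | [], _ => decide
      | d :: r', h =>
          have hd : d ≠ 'I' := fun hdI => h r' (by rw [hdI])
          have hdb : (d == 'I') = false := by simpa using hd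
          simp [pvRun, pvStep, List.foldl, hdb]
          simpa [pvRun] using pvRun_dead r'

-- ===== VERDICT (by name: the statement is the Claim_ definition above) =====
theorem is_repetitive_spec : Claim_equal_is_repetitive := by
  intro s _
  unfold Spec_is_repetitive is_repetitive is_repetitive_alt
  simpa [pvRun] using pvLoopA_eq_run s.toList
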